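-- pv_equiv track=rewrite | github.com/keshavsingh4522/hacktoberfest | Python/list_item_reverse.py | dividing_reverse
-- ===== SOURCE A (Python) =====
-- def dividing_reverse(lst):
--     for i in range(len(lst)):
--         rev = 0
--         while lst[i] > 0:
--             rev = (rev * 10) + lst[i] % 10
--             lst[i] //= 10
--         lst[i] = rev
--     return lst
-- ===== SOURCE B (Python) =====
-- def rev_pow(n):
--     # returns (decimal reversal of n, 10**(number of digits of n)); (0, 1) for n <= 0
--     if n <= 0:
--         return (0, 1)
--     r, p = rev_pow(n // 10)
--     return (n % 10 * p + r, 10 * p)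
--
--
-- def dividing_reverse(lst):
--     lst[:] = [rev_pow(x)[0] for x in lst]
--     return lst
-- ===== Notes on version B (the rewrite author's own statement) =====
-- stated objective: alternative
-- what changed: Replaces the in-place index loop with an accumulator while-loop by a pure bottom-up recursion rev_pow(n) returning the pair (reversal, 10**digits) and a single list comprehension assigned back into the list.
import Mathlib
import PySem

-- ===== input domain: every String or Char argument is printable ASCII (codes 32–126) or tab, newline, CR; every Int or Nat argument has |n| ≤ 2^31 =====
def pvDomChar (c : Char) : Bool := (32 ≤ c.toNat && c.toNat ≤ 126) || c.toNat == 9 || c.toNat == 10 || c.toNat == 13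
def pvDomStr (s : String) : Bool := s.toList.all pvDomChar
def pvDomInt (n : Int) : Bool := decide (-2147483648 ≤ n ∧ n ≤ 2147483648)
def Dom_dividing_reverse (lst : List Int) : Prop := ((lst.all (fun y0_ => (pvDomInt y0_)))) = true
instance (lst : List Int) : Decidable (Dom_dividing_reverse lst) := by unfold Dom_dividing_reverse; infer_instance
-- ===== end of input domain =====

-- B replaces A's in-place index loop + accumulator while-loop by a pure recursion returning
-- (reversal, 10^digits) pairs and a list comprehension (alternative decomposition, same cost).
-- A mutates its argument in place (B does the same via lst[:] = ...); the Lean claim is about the return value.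


-- ===== PORT A =====
-- the 'while lst[i] > 0' loop on the current cell value x and the accumulator rev
def pyRevLoop (x rev : Int) : Int :=
  if 0 < x then pyRevLoop (PySem.Int.floordiv x 10) (rev * 10 + PySem.Int.mod x 10) else rev
termination_by x.toNat
decreasing_by
  rw [PySem.Int.floordiv_eq_ediv_of_pos (by omega)]
  omega

def dividing_reverse (lst : List Int) : List Int :=
  (PySem.List.pyRange 0 (lst.length : Int) 1).foldl
    (fun acc i => PySem.List.pySetD acc i (pyRevLoop (PySem.List.pyGetD acc i 0) 0)) lst

-- ===== PORT B =====
def revPow (n : Int) : Int × Int :=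
  if n ≤ 0 then (0, 1)
  else
    let rp := revPow (PySem.Int.floordiv n 10)
    (PySem.Int.mod n 10 * rp.2 + rp.1, 10 * rp.2)
termination_by n.toNat
decreasing_by
  rw [PySem.Int.floordiv_eq_ediv_of_pos (by omega)]
  omega

def dividing_reverse_alt (lst : List Int) : List Int :=
  lst.map (fun x => (revPow x).1)

-- ===== PRECONDITION & SPEC =====
def Spec_dividing_reverse (lst : List Int) (out : List Int) : Prop := out = dividing_reverse_alt lst
instance (lst : List Int) (out : List Int) : Decidable (Spec_dividing_reverse lst out) := by unfold Spec_dividing_reverse; infer_instance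

-- ===== CLAIM (what is proved, stated in full; the proofs are below) =====
def Claim_equal_dividing_reverse : Prop := ∀ (lst : List Int), Dom_dividing_reverse lst → Spec_dividing_reverse lst (dividing_reverse lst)

-- ===== LEMMAS AND PROOFS =====

theorem revPow_nonpos {n : Int} (h : n ≤ 0) : revPow n = (0, 1) := by
  rw [revPow, if_pos h]

theorem revPow_pos {n : Int} (h : 0 < n) :
    revPow n = (PySem.Int.mod n 10 * (revPow (PySem.Int.floordiv n 10)).2 + (revPow (PySem.Int.floordiv n 10)).1,
                10 * (revPow (PySem.Int.floordiv n 10)).2) := by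
  rw [revPow, if_neg (by omega)]

-- A's while-loop equals acc shifted past B's digit count, plus B's reversal.
theorem pyRevLoop_eq_revPow (x acc : Int) : pyRevLoop x acc = acc * (revPow x).2 + (revPow x).1 := by
  induction x, acc using pyRevLoop.induct with
  | case1 x rev hx ih =>
    rw [pyRevLoop, if_pos hx, ih, revPow_pos hx]
    ring
  | case2 x rev hx =>
    rw [pyRevLoop, if_neg hx, revPow_nonpos (by omega)]
    simp

theorem foldl_set_map (f : Int → Int) :
    ∀ (suf pre : List Int),
      (PySem.List.pyRange (pre.length : Int) ((pre.length + suf.length : Nat) : Int) 1).foldl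
        (fun acc i => PySem.List.pySetD acc i (f (PySem.List.pyGetD acc i 0))) (pre ++ suf)
      = pre ++ suf.map f := by
  intro suf
  induction suf with
  | nil =>
    intro pre
    simp [PySem.List.pyRange_one_eq_nil]
  | cons x suf ih =>
    intro pre
    rw [PySem.List.pyRange_one_cons (by push_cast [List.length_cons]; omega)]
    rw [List.foldl_cons]
    have hget : PySem.List.pyGetD (pre ++ x :: suf) (pre.length : Int) 0 = x := by
      rw [PySem.List.pyGetD_natCast]
      simp
    have hset : PySem.List.pySetD (pre ++ x :: suf) (pre.length : Int) (f x) = (pre ++ [f x]) ++ suf := by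
      rw [PySem.List.pySetD_natCast]
      simp
    rw [hget, hset]
    have h2 := ih (pre ++ [f x])
    have hlen : ((pre ++ [f x]).length : Int) = (pre.length : Int) + 1 := by simp
    have hlen2 : (((pre ++ [f x]).length + suf.length : Nat) : Int) = ((pre.length + (x :: suf).length : Nat) : Int) := by
      simp; omega
    rw [hlen, hlen2] at h2
    rw [h2]
    simp

-- ===== VERDICT (by name: the statement is the Claim_ definition above) =====
theorem dividing_reverse_spec : Claim_equal_dividing_reverse := by
  intro lst _
  unfold Spec_dividing_reverse dividing_reverse dividing_reverse_alt
  have h := foldl_set_map (fun x => pyRevLoop x 0) lst []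
  have h2 : lst.map (fun x => pyRevLoop x 0) = lst.map (fun x => (revPow x).1) :=
    List.map_congr_left (fun x _ => by rw [pyRevLoop_eq_revPow]; ring)
  simpa [h2] using h
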